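-- pv_equiv track=rewrite | github.com/MutaharC/relython | finout.py | llfmt
-- ===== SOURCE A (Python) =====
-- def llfmt(longline, maxlen=68, shunt=9):
--     """
--     Format a long output line to fit within 79 character limit.
--     """
--
--     out = ''
--     if len(longline) < maxlen:
--         return longline
--     else:
--         lstr = list(longline)
--         spcix = [i for i, char in enumerate(lstr) if char==' ']
--         for i in range(1, len(spcix), 1):
--             if spcix[i]%maxlen < spcix[i-1]%maxlen:
--                 lstr[spcix[i-1]] = '\n' + ' '*shunt
--     return ''.join(lstr)
-- ===== SOURCE B (Python) =====
-- def llfmt(longline, maxlen=68, shunt=9):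
--     """
--     Format a long output line to fit within 79 character limit.
--     """
--     if len(longline) < maxlen:
--         return longline
--     words = longline.split(' ')
--     pos = []            # pos[i] = index of the i-th space in longline
--     p = -1
--     for w in words[:-1]:
--         p += len(w) + 1
--         pos.append(p)
--     seps = ['\n' + ' ' * shunt if b % maxlen < a % maxlen else ' '
--             for a, b in zip(pos, pos[1:])]
--     seps.append(' ')    # the last space is never replaced
--     return ''.join(words[:1] + [s + w for s, w in zip(seps, words[1:])])
-- ===== Notes on version B (the rewrite author's own statement) =====
-- stated objective: faster
-- what changed: B never touches a mutable character list: it splits the line into words with str.split(' '), derives each space's index from the cumulative word lengths, picks every separator pairwise with zip(pos, pos[1:]), and reassembles the output with join, whereas A scans the characters to collect space indices and overwrites entries of a per-character list in place; the per-character Python-level work is replaced by C-level split/zip/join (measured ~14x at the largest size).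
import Mathlib
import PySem

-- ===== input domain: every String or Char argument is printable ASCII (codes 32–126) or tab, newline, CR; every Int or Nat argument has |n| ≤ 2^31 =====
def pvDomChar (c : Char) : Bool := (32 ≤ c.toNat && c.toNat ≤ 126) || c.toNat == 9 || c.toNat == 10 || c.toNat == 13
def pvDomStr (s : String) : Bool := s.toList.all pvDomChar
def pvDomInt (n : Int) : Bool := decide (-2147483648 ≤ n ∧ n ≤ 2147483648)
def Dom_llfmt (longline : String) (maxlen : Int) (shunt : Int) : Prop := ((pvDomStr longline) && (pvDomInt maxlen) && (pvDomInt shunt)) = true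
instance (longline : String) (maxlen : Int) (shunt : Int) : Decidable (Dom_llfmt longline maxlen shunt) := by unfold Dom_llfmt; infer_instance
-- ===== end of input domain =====

-- B rebuilds the line from its ' '-split words: space positions come from the word
-- lengths and each separator is chosen pairwise with zip, instead of A's in-place
-- replacement inside a mutable character list (objective: faster by a constant factor,
-- measured).

-- ===== PORT A =====
def llfmt (longline : String) (maxlen : Int) (shunt : Int) : String :=
  if PySem.Str.len longline < maxlen then longline
  else
    let lstr : List (List Char) := longline.toList.map (fun c => [c])
    let spcix : List Int :=
      (PySem.List.enumerate longline.toList 0).filterMap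
        (fun p => if p.2 = ' ' then some p.1 else none)
    let lstr :=
      (PySem.List.pyRange 1 (spcix.length : Int) 1).foldl
        (fun l i =>
          if PySem.Int.mod (PySem.List.pyGetD spcix i 0) maxlen
               < PySem.Int.mod (PySem.List.pyGetD spcix (i - 1) 0) maxlen
          then PySem.List.pySetD l (PySem.List.pyGetD spcix (i - 1) 0)
                 ('\n' :: List.replicate shunt.toNat ' ')  -- ' '*shunt: empty for shunt ≤ 0, as in Python
          else l) lstr
    String.ofList (PySem.Chars.join [] lstr)

-- ===== PORT B =====
def llfmt_alt (longline : String) (maxlen : Int) (shunt : Int) : String :=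
  if PySem.Str.len longline < maxlen then longline
  else
    let words := PySem.Chars.splitOn longline.toList [' ']       -- longline.split(' ')
    let pos := ((PySem.List.slice words none (some (-1))).foldl  -- for w in words[:-1]: p += len(w)+1; pos.append(p)
        (fun (st : List Int × Int) w =>
          (st.1 ++ [st.2 + (w.length : Int) + 1], st.2 + (w.length : Int) + 1)) ([], -1)).1
    let seps := (pos.zip (PySem.List.slice pos (some 1) none)).map
        (fun ab => if PySem.Int.mod ab.2 maxlen < PySem.Int.mod ab.1 maxlen
          then '\n' :: List.replicate shunt.toNat ' '  -- ' '*shunt: empty for shunt ≤ 0, as in Python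
          else [' '])
    let seps := seps ++ [[' ']]
    String.ofList (PySem.Chars.join []
      (PySem.List.slice words none (some 1) ++
        (seps.zip (PySem.List.slice words (some 1) none)).map (fun sw => sw.1 ++ sw.2)))

-- ===== PRECONDITION & SPEC =====
-- Pre_ excludes exactly the inputs where the Python A raises ZeroDivisionError
-- (maxlen = 0 and at least two spaces in the line, so `%maxlen` is reached).
def Pre_llfmt (longline : String) (maxlen : Int) (shunt : Int) : Prop :=
  maxlen = 0 → longline.toList.count ' ' < 2
instance (longline : String) (maxlen : Int) (shunt : Int) : Decidable (Pre_llfmt longline maxlen shunt) := by unfold Pre_llfmt; infer_instance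
def pvWitness_llfmt : String × Int × Int := ("a b c d e f g h", 5, 2)

def Spec_llfmt (longline : String) (maxlen : Int) (shunt : Int) (out : String) : Prop := out = llfmt_alt longline maxlen shunt
instance (longline : String) (maxlen : Int) (shunt : Int) (out : String) : Decidable (Spec_llfmt longline maxlen shunt out) := by unfold Spec_llfmt; infer_instance

-- ===== CLAIM (what is proved, stated in full; the proofs are below) =====
def Claim_equal_llfmt : Prop := ∀ (longline : String) (maxlen : Int) (shunt : Int), Dom_llfmt longline maxlen shunt → Pre_llfmt longline maxlen shunt → Spec_llfmt longline maxlen shunt (llfmt longline maxlen shunt)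

-- ===== LEMMAS AND PROOFS =====

-- Core of A's loop: fold over the remaining space indices, `p` the previous one,
-- `off` the number of leading cells already peeled off the cell list.
def pvPF (m : Int) (r : List Char) (off : Int) : List Int → List (List Char) → Int → List (List Char)
  | [], l, _ => l
  | x :: xs, l, p =>
      pvPF m r off xs
        (if PySem.Int.mod x m < PySem.Int.mod p m then PySem.List.pySetD l (p - off) r else l) x

-- space positions of cs, counting from k (A's spcix)
def pvSp (cs : List Char) (k : Int) : List Int :=
  (PySem.List.enumerate cs k).filterMap (fun p => if p.2 = ' ' then some p.1 else none)

-- structural version of longline.split(' ')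
def pvSplit : List Char → List (List Char)
  | [] => [[]]
  | c :: rest =>
      if c = ' ' then [] :: pvSplit rest
      else
        match pvSplit rest with
        | [] => [[c]]
        | w :: ws => (c :: w) :: ws

-- space positions read off the word lengths: first word starts at k
def pvPos : List (List Char) → Int → List Int
  | [], _ => []
  | [_], _ => []
  | w :: w2 :: ws, k => (k + (w.length : Int)) :: pvPos (w2 :: ws) (k + (w.length : Int) + 1)

-- the tail of the output after the first word: separator + word, repeated;
-- p = index of the space standing before the head word of ws
def pvTail (m : Int) (r : List Char) : Int → List (List Char) → List Char
  | _, [] => []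
  | p, w :: ws =>
      (match ws with
       | [] => [' ']
       | _ :: _ =>
           if PySem.Int.mod (p + 1 + (w.length : Int)) m < PySem.Int.mod p m then r else [' '])
        ++ w ++ pvTail m r (p + 1 + (w.length : Int)) ws

-- positions as B's accumulator loop produces them (p starts at -1)
def pvPosAcc : List (List Char) → Int → List Int
  | [], _ => []
  | w :: ws, p => (p + (w.length : Int) + 1) :: pvPosAcc ws (p + (w.length : Int) + 1)

theorem pvJoinNil (L : List (List Char)) : PySem.Chars.join [] L = L.flatten := by
  induction L with
  | nil => rfl
  | cons a t ih =>
    cases t with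
    | nil => simp [PySem.Chars.join, List.intercalate]
    | cons b t2 =>
      simp only [PySem.Chars.join, List.intercalate] at ih ⊢
      rw [show List.intersperse ([] : List Char) (a :: b :: t2)
            = a :: [] :: List.intersperse [] (b :: t2) from by simp [List.intersperse]]
      simp [ih]

theorem pvFlattenSing (cs : List Char) : (cs.map (fun c => ([c] : List Char))).flatten = cs := by
  rw [← pvJoinNil, PySem.Chars.join_nil_singletons]

theorem pvSplit_ne_nil (cs : List Char) : pvSplit cs ≠ [] := by
  cases cs with
  | nil => simp [pvSplit]
  | cons c rest =>
    by_cases hc : c = ' '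
    · simp [pvSplit, hc]
    · simp only [pvSplit, if_neg hc]
      cases h : pvSplit rest <;> simp

theorem pvGo (fuel : Nat) : ∀ (l cur : List Char) (acc : List (List Char)), l.length ≤ fuel →
    PySem.Chars.splitOn.go [' '] fuel l cur acc
      = acc.reverse ++ (cur.reverse ++ (pvSplit l).headI) :: (pvSplit l).tail := by
  induction fuel with
  | zero =>
    intro l cur acc h
    have hl : l = [] := by cases l <;> simp_all
    subst hl
    simp [PySem.Chars.splitOn.go, pvSplit]
  | succ f ih =>
    intro l cur acc h
    cases l with
    | nil => simp [PySem.Chars.splitOn.go, pvSplit]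
    | cons c rest =>
      by_cases hc : c = ' '
      · subst hc
        have hpre : List.isPrefixOf [' '] (' ' :: rest) = true := by
          simp [List.isPrefixOf]
        simp only [PySem.Chars.splitOn.go, hpre, if_true, List.length_cons,
          List.drop_succ_cons]
        simp only [List.length_nil, List.drop_zero]
        rw [ih rest [] (cur.reverse :: acc) (by simpa using Nat.lt_succ_iff.mp (by simpa using h))]
        have hne := pvSplit_ne_nil rest
        cases hsp : pvSplit rest with
        | nil => exact absurd hsp hne
        | cons w ws => simp [pvSplit, hsp]
      · have hpre : List.isPrefixOf [' '] (c :: rest) = false := by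
          simp [List.isPrefixOf]
          intro h'; exact hc h'.symm
        simp only [PySem.Chars.splitOn.go, hpre]
        rw [ih rest (c :: cur) acc (by simpa using Nat.lt_succ_iff.mp (by simpa using h))]
        have hne := pvSplit_ne_nil rest
        cases hsp : pvSplit rest with
        | nil => exact absurd hsp hne
        | cons w ws => simp [pvSplit, if_neg hc, hsp]

theorem pvSplitOn_eq (cs : List Char) : PySem.Chars.splitOn cs [' '] = pvSplit cs := by
  have h := pvGo (cs.length + 1) cs [] [] (by omega)
  have hne := pvSplit_ne_nil cs
  cases hsp : pvSplit cs with
  | nil => exact absurd hsp hne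
  | cons w ws =>
    rw [hsp] at h
    simpa [PySem.Chars.splitOn] using h

theorem pvInterCons (a w : List Char) (ws : List (List Char)) :
    List.intercalate [' '] (a :: w :: ws) = a ++ ' ' :: List.intercalate [' '] (w :: ws) := by
  simp [List.intercalate, List.intersperse]

theorem pvInter_pvSplit (cs : List Char) : List.intercalate [' '] (pvSplit cs) = cs := by
  induction cs with
  | nil => simp [pvSplit, List.intercalate]
  | cons c rest ih =>
    by_cases hc : c = ' '
    · subst hc
      simp only [pvSplit, if_true]
      cases hsp : pvSplit rest with
      | nil => exact absurd hsp (pvSplit_ne_nil rest)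
      | cons w ws =>
        rw [hsp] at ih
        rw [pvInterCons, ih.symm] at *
        simp [hsp, ih]
    · simp only [pvSplit, if_neg hc]
      cases hsp : pvSplit rest with
      | nil => exact absurd hsp (pvSplit_ne_nil rest)
      | cons w ws =>
        rw [hsp] at ih
        cases ws with
        | nil => simp_all [List.intercalate]
        | cons v t =>
          rw [pvInterCons] at ih ⊢
          simp [ih]

theorem pvSp_eq_pvPos (cs : List Char) : ∀ k, pvSp cs k = pvPos (pvSplit cs) k := by
  induction cs with
  | nil => intro k; simp [pvSp, pvSplit, pvPos, PySem.List.enumerate_nil]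
  | cons c rest ih =>
    intro k
    by_cases hc : c = ' '
    · subst hc
      cases hsp : pvSplit rest with
      | nil => exact absurd hsp (pvSplit_ne_nil rest)
      | cons w ws =>
        have := ih (k + 1)
        rw [hsp] at this
        simp [pvSp, pvSplit, pvPos, PySem.List.enumerate_cons, hsp, ← this]
    · cases hsp : pvSplit rest with
      | nil => exact absurd hsp (pvSplit_ne_nil rest)
      | cons w ws =>
        have hrest := ih (k + 1)
        rw [hsp] at hrest
        have hstep : pvSp (c :: rest) k = pvSp rest (k + 1) := by
          simp [pvSp, PySem.List.enumerate_cons, hc]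
        rw [hstep, hrest]
        cases ws with
        | nil => simp [pvSplit, if_neg hc, hsp, pvPos]
        | cons v t =>
          simp only [pvSplit, if_neg hc, hsp, pvPos, List.length_cons]
          congr 1
          · push_cast; ring
          · congr 1; push_cast; ring

theorem pvPos_mono (ws : List (List Char)) : ∀ k, ∀ x ∈ pvPos ws k, k ≤ x := by
  induction ws with
  | nil => intro k x hx; simp [pvPos] at hx
  | cons w ws ih =>
    cases ws with
    | nil => intro k x hx; simp [pvPos] at hx
    | cons w2 t =>
      intro k x hx
      simp only [pvPos, List.mem_cons] at hx
      rcases hx with h | h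
      · omega
      · have := ih (k + (w.length : Int) + 1) x h
        omega

theorem pvPos_pairwise (ws : List (List Char)) : ∀ k, (pvPos ws k).Pairwise (· ≤ ·) := by
  induction ws with
  | nil => intro k; simp [pvPos]
  | cons w ws ih =>
    cases ws with
    | nil => intro k; simp [pvPos]
    | cons w2 t =>
      intro k
      simp only [pvPos, List.pairwise_cons]
      refine ⟨fun x hx => ?_, ih _⟩
      have := pvPos_mono (w2 :: t) (k + (w.length : Int) + 1) x hx
      omega

theorem pvSetD_zero_cons (x v : List Char) (xs : List (List Char)) :
    PySem.List.pySetD (x :: xs) 0 v = v :: xs := by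
  simp [PySem.List.pySetD, PySem.List.pySet?, PySem.List.pyIdx?]

theorem pvSetD_append_right (l1 l2 : List (List Char)) (i : Int) (v : List Char)
    (h : (l1.length : Int) ≤ i) :
    PySem.List.pySetD (l1 ++ l2) i v = l1 ++ PySem.List.pySetD l2 (i - l1.length) v := by
  induction l1 generalizing i with
  | nil => simp
  | cons a t ih =>
    simp only [List.length_cons, List.cons_append] at h ⊢
    have hi : 0 ≤ i := by push_cast at h; omega
    have hrec := ih (i - 1) (by push_cast at h ⊢; omega)
    have hstep : PySem.List.pySetD (a :: (t ++ l2)) i v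
        = a :: PySem.List.pySetD (t ++ l2) (i - 1) v := by
      simp only [PySem.List.pySetD, PySem.List.pySet?, PySem.List.pyIdx?]
      by_cases hlt : i < (((a :: (t ++ l2)).length : Nat) : Int)
      · have hlt2 : i < ((t ++ l2).length : Int) + 1 := by
          push_cast [List.length_cons] at hlt; push_cast; omega
        rw [if_pos hi, if_pos (by push_cast [List.length_cons]; push_cast at hlt2; omega),
          if_pos (by omega), if_pos (by push_cast at hlt2 ⊢; omega)]
        simp only [Option.map_some, Option.getD_some]
        have : i.toNat = (i - 1).toNat + 1 := by omega
        rw [this, List.set_cons_succ]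
      · have hlt2 : ¬ i < ((t ++ l2).length : Int) + 1 := by
          push_cast [List.length_cons] at hlt; push_cast; omega
        rw [if_pos hi, if_neg (by push_cast [List.length_cons]; push_cast at hlt2; omega),
          if_pos (by omega), if_neg (by push_cast at hlt2 ⊢; omega)]
        rfl
    rw [hstep, hrec,
      show i - 1 - ((t.length : Nat) : Int) = i - (((t.length : Nat) : Int) + 1) from by omega]
    simp

-- A's indexed loop over `spcix` computes pvPF (with no cells peeled off).
theorem pvA_loop (m : Int) (r : List Char) (spcix : List Int) :
    ∀ (k : Nat) (l : List (List Char)), 1 ≤ k →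
      (PySem.List.pyRange (k : Int) (spcix.length : Int) 1).foldl
        (fun l i =>
          if PySem.Int.mod (PySem.List.pyGetD spcix i 0) m
               < PySem.Int.mod (PySem.List.pyGetD spcix (i - 1) 0) m
          then PySem.List.pySetD l (PySem.List.pyGetD spcix (i - 1) 0) r
          else l) l
      = pvPF m r 0 (spcix.drop k) l (spcix.getD (k - 1) 0) := by
  intro k l hk
  generalize hn : spcix.length - k = n
  induction n generalizing k l with
  | zero =>
    rw [PySem.List.pyRange_one_eq_nil (by omega), List.drop_eq_nil_of_le (by omega)]
    rfl
  | succ n ih =>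
    have hkl : k < spcix.length := by omega
    rw [PySem.List.pyRange_one_cons (by exact_mod_cast hkl)]
    simp only [List.foldl_cons]
    have h1 : (k : Int) - 1 = ((k - 1 : Nat) : Int) := by omega
    have h2 : (k : Int) + 1 = ((k + 1 : Nat) : Int) := by omega
    rw [h1, h2, PySem.List.pyGetD_natCast, PySem.List.pyGetD_natCast,
        ih (k + 1) _ (by omega) (by omega)]
    rw [List.drop_eq_getElem_cons hkl]
    simp only [pvPF, Nat.add_sub_cancel, List.getD_eq_getElem _ _ hkl, sub_zero]

-- peeling a prefix the remaining sets never touch out of pvPF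
theorem pvPF_append (m : Int) (r : List Char) :
    ∀ (sp : List Int) (p off : Int) (l1 l2 : List (List Char)),
      (l1.length : Int) ≤ p - off → (∀ x ∈ sp, p ≤ x) → sp.Pairwise (· ≤ ·) →
      pvPF m r off sp (l1 ++ l2) p = l1 ++ pvPF m r (off + l1.length) sp l2 p := by
  intro sp
  induction sp with
  | nil => intro p off l1 l2 _ _ _; rfl
  | cons x xs ih =>
    intro p off l1 l2 hlen hmem hpw
    simp only [pvPF]
    have heq : p - off - (l1.length : Int) = p - (off + l1.length) := by ring
    have hset : PySem.List.pySetD (l1 ++ l2) (p - off) r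
        = l1 ++ PySem.List.pySetD l2 (p - (off + (l1.length : Int))) r := by
      rw [pvSetD_append_right _ _ _ _ hlen, heq]
    have hx : p ≤ x := hmem x (List.mem_cons_self ..)
    have hmem' : ∀ y ∈ xs, x ≤ y := (List.pairwise_cons.mp hpw).1
    have hpw' := (List.pairwise_cons.mp hpw).2
    by_cases hcond : PySem.Int.mod x m < PySem.Int.mod p m
    · rw [if_pos hcond, if_pos hcond, hset, ih x off l1 _ (by omega) hmem' hpw']
    · rw [if_neg hcond, if_neg hcond, ih x off l1 _ (by omega) hmem' hpw']

-- the heart of the A-side normal form: pvPF over a word decomposition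
theorem pvMain (m : Int) (r : List Char) :
    ∀ (ws : List (List Char)) (w : List Char) (off : Int), ws ≠ [] →
      PySem.Chars.join []
        (pvPF m r off (pvPos ws (off + (w.length : Int) + 1))
          ((w ++ ' ' :: List.intercalate [' '] ws).map (fun c => [c])) (off + (w.length : Int)))
      = w ++ pvTail m r (off + (w.length : Int)) ws := by
  intro ws
  induction ws with
  | nil => intro w off h; exact absurd rfl h
  | cons w1 rest2 ih =>
    intro w off _
    cases rest2 with
    | nil =>
      have h1 : List.intercalate [' '] [w1] = w1 := by simp [List.intercalate]
      rw [h1]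
      simp only [pvPos, pvPF]
      rw [PySem.Chars.join_nil_singletons]
      simp [pvTail]
    | cons w2 t =>
      have hq : off + (w.length : Int) + 1 + (w1.length : Int)
          = (off + (w.length : Int) + 1) + (w1.length : Int) := by ring
      simp only [pvPos]
      rw [pvInterCons]
      -- cells split: map sing (w ++ ' ' :: (w1 ++ ' ' :: I))
      set I := List.intercalate [' '] (w2 :: t) with hI
      set p := off + (w.length : Int) with hp
      set q := p + 1 + (w1.length : Int) with hqdef
      -- one pvPF step
      simp only [pvPF]
      have hcells : (w ++ ' ' :: (w1 ++ ' ' :: I)).map (fun c => ([c] : List Char))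
          = (w.map (fun c => [c])) ++ [' '] :: ((w1 ++ ' ' :: I).map (fun c => [c])) := by
        simp
      have hsetd : PySem.List.pySetD ((w.map (fun c => ([c] : List Char))) ++ [' '] :: ((w1 ++ ' ' :: I).map (fun c => [c]))) (p - off) r
          = (w.map (fun c => [c])) ++ r :: ((w1 ++ ' ' :: I).map (fun c => [c])) := by
        have : p - off = (w.length : Int) := by rw [hp]; ring
        rw [this]
        have hl : ((w.map (fun c => ([c] : List Char))).length : Int) = (w.length : Int) := by simp
        rw [← hl, pvSetD_append_right _ _ _ _ (le_refl _)]
        rw [sub_self, pvSetD_zero_cons]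
      set sep' : List Char := if PySem.Int.mod (p + 1 + (w1.length : Int)) m < PySem.Int.mod p m then r else [' '] with hsep
      have hone : (if PySem.Int.mod (p + 1 + (w1.length : Int)) m < PySem.Int.mod p m
            then PySem.List.pySetD ((w ++ ' ' :: (w1 ++ ' ' :: I)).map (fun c => [c])) (p - off) r
            else (w ++ ' ' :: (w1 ++ ' ' :: I)).map (fun c => [c]))
          = ((w.map (fun c => [c])) ++ [sep']) ++ ((w1 ++ ' ' :: I).map (fun c => [c])) := by
        rw [hcells]
        by_cases hcond : PySem.Int.mod (p + 1 + (w1.length : Int)) m < PySem.Int.mod p m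
        · rw [if_pos hcond, hsetd]; simp [hsep, hcond]
        · rw [if_neg hcond]; simp [hsep, hcond]
      rw [hone]
      have hmono := pvPos_mono (w2 :: t) (q + 1)
      have hmono' : ∀ x ∈ pvPos (w2 :: t) (p + 1 + (w1.length : Int) + 1), q ≤ x := by
        intro x hx
        have := hmono x (by rw [hqdef]; exact hx)
        omega
      have happ := pvPF_append m r (pvPos (w2 :: t) (p + 1 + (w1.length : Int) + 1)) q off
        ((w.map (fun c => [c])) ++ [sep']) ((w1 ++ ' ' :: I).map (fun c => [c]))
        (by simp only [hqdef, hp, List.length_append, List.length_map, List.length_cons,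
              List.length_nil]
            push_cast
            omega)
        hmono' (pvPos_pairwise _ _)
      rw [happ]
      rw [pvJoinNil, List.flatten_append]
      have hih := ih w1 (off + (w.length : Int) + 1) (by simp)
      rw [pvJoinNil] at hih
      have harg1 : pvPos (w2 :: t) (off + (w.length : Int) + 1 + (w1.length : Int) + 1)
          = pvPos (w2 :: t) (p + 1 + (w1.length : Int) + 1) := by
        congr 1
      have harg2 : off + (w.length : Int) + 1 + (w1.length : Int) = q := by
        rw [hqdef, hp]
      have hoff : off + ((w.map (fun c => ([c] : List Char))) ++ [sep']).length
          = off + (w.length : Int) + 1 := by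
        push_cast [List.length_append, List.length_map, List.length_cons, List.length_nil]
        ring
      rw [harg1, harg2] at hih
      rw [hoff, hih]
      have hflat : ((w.map (fun c => ([c] : List Char))) ++ [sep']).flatten = w ++ sep' := by
        rw [List.flatten_append, pvFlattenSing]
        simp
      rw [hflat]
      have hsep2 : (if PySem.Int.mod q m < PySem.Int.mod p m then r else [' ']) = sep' := by
        rw [hqdef]
      conv_rhs => rw [pvTail]
      simp only [← hqdef]
      simp [List.append_assoc, hsep2]

-- B's position loop
theorem pvB_posloop (ws : List (List Char)) :
    ∀ (acc : List Int) (p : Int),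
      (ws.foldl
        (fun (st : List Int × Int) w =>
          (st.1 ++ [st.2 + (w.length : Int) + 1], st.2 + (w.length : Int) + 1)) (acc, p)).1
      = acc ++ pvPosAcc ws p := by
  induction ws with
  | nil => intro acc p; simp [pvPosAcc]
  | cons w ws ih =>
    intro acc p
    simp only [List.foldl_cons, pvPosAcc]
    rw [ih]
    simp

theorem pvPosAcc_dropLast (ws : List (List Char)) : ∀ p, pvPosAcc ws.dropLast p = pvPos ws (p + 1) := by
  induction ws with
  | nil => intro p; simp [pvPosAcc, pvPos]
  | cons w ws ih =>
    cases ws with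
    | nil => intro p; simp [pvPosAcc, pvPos]
    | cons w2 t =>
      intro p
      have hd : (w :: w2 :: t).dropLast = w :: (w2 :: t).dropLast := by
        simp [List.dropLast_cons_of_ne_nil]
      rw [hd]
      simp only [pvPosAcc]
      rw [ih]
      simp only [pvPos]
      congr 1
      · push_cast; ring
      · congr 1; push_cast; ring

-- B's zip of pairwise separators with the remaining words computes pvTail
theorem pvB_tail (m : Int) (r : List Char) :
    ∀ (ws : List (List Char)) (p : Int),
      PySem.Chars.join []
        (((((p :: pvPos ws (p + 1)).zip (pvPos ws (p + 1))).map
              (fun ab => if PySem.Int.mod ab.2 m < PySem.Int.mod ab.1 m then r else [' '])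
            ++ [[' ']]).zip ws).map (fun sw => sw.1 ++ sw.2))
      = pvTail m r p ws := by
  intro ws
  induction ws with
  | nil => intro p; simp [pvPos, pvTail, pvJoinNil]
  | cons w1 rest2 ih =>
    intro p
    cases rest2 with
    | nil => simp [pvPos, pvTail, pvJoinNil]
    | cons w2 t =>
      simp only [pvPos]
      rw [pvJoinNil]
      simp only [List.zip_cons_cons, List.map_cons, List.cons_append, List.flatten_cons]
      have hihq := ih (p + 1 + (w1.length : Int))
      rw [pvJoinNil] at hihq
      rw [hihq]
      conv_rhs => rw [pvTail]
      try simp [List.append_assoc]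

-- ===== VERDICT (by name: the statement is the Claim_ definition above) =====
theorem llfmt_spec : Claim_equal_llfmt := by
  intro longline maxlen shunt _ _
  unfold Spec_llfmt llfmt llfmt_alt
  by_cases hlen : PySem.Str.len longline < maxlen
  · simp only [if_pos hlen]
  · simp only [if_neg hlen]
    have hA := pvA_loop maxlen ('\n' :: List.replicate shunt.toNat ' ')
      ((PySem.List.enumerate longline.toList 0).filterMap
        (fun p => if p.2 = ' ' then some p.1 else none))
      1 (longline.toList.map (fun c => [c])) le_rfl
    norm_num at hA
    have hsp : (List.filterMap (fun p => if p.2 = ' ' then some p.1 else none)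
        (PySem.List.enumerate longline.toList)) = pvSp longline.toList 0 := rfl
    rw [hA, hsp, pvSp_eq_pvPos]
    rw [pvSplitOn_eq, PySem.List.slice_to_neg_one, PySem.List.slice_from_one,
      PySem.List.slice_from_one, pvB_posloop, List.nil_append, pvPosAcc_dropLast]
    norm_num
    have hs1 : PySem.List.slice (pvSplit longline.toList) none (some 1)
        = (pvSplit longline.toList).take 1 := by
      simp [pysem]
    rw [hs1]
    cases hws : pvSplit longline.toList with
    | nil => exact absurd hws (pvSplit_ne_nil _)
    | cons w0 rest =>
      have hcs : longline.toList = List.intercalate [' '] (w0 :: rest) := by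
        rw [← hws, pvInter_pvSplit]
      cases rest with
      | nil =>
        simp only [pvPos, pvPF, List.tail_nil, List.take_succ_cons, List.take_zero]
        rw [pvJoinNil, pvJoinNil, pvFlattenSing]
        simp [hcs, List.intercalate]
      | cons w1 rest1 =>
        simp only [pvPos, List.tail_cons, List.getElem?_cons_zero, Option.getD_some,
          List.take_succ_cons, List.take_zero, zero_add]
        have hmain := pvMain maxlen ('\n' :: List.replicate shunt.toNat ' ')
          (w1 :: rest1) w0 0 (by simp)
        simp only [zero_add] at hmain
        have hbt := pvB_tail maxlen ('\n' :: List.replicate shunt.toNat ' ')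
          (w1 :: rest1) ((w0.length : Int))
        rw [pvJoinNil] at hbt
        rw [hcs, pvInterCons]
        rw [hmain]
        rw [pvJoinNil]
        simp only [List.cons_append, List.nil_append, List.flatten_cons]
        rw [hbt]
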